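-- pv_equiv track=rewrite | github.com/docxology/aif_iwai2025_thoughtseeds | analysis/statistical_analyzer.py | _calculate_state_durations
-- ===== SOURCE A (Python) =====
-- from typing import Dict, List, Any, Optional, Tuple
--
-- def _calculate_state_durations(state_history: List[str], target_state: str) -> List[int]:
--     """Calculate durations for each occurrence of a state."""
--     durations = []
--     current_duration = 0
--
--     for state in state_history:
--         if state == target_state:
--             current_duration += 1
--         else:
--             if current_duration > 0:
--                 durations.append(current_duration)
--                 current_duration = 0
--
--     if current_duration > 0:
--         durations.append(current_duration)
--
--     return durations
-- ===== SOURCE B (Python) =====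
-- from itertools import groupby
-- from typing import List
--
-- def _calculate_state_durations(state_history: List[str], target_state: str) -> List[int]:
--     """Calculate durations for each occurrence of a state."""
--     return [sum(1 for _ in group) for key, group in groupby(state_history)
--             if key == target_state]
-- ===== Notes on version B (the rewrite author's own statement) =====
-- stated objective: idiomatic
-- what changed: B replaces A's manual run-length counter with its two flush branches by itertools.groupby: group consecutive equal states, keep the groups whose key is the target, and emit each group's length.
import Mathlib
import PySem

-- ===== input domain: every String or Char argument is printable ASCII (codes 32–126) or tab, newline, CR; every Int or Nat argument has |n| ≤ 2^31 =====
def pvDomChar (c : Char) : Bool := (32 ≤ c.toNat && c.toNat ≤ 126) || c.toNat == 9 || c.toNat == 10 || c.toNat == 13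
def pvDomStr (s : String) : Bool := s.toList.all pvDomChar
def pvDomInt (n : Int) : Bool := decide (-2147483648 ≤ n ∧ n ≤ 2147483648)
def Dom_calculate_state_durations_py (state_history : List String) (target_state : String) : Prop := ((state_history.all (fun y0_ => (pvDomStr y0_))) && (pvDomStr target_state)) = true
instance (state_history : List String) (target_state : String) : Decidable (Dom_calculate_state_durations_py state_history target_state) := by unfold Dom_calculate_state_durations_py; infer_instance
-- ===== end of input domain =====

-- B replaces A's manual run-length counter and flush branches by grouping consecutive
-- equal states (itertools.groupby) and emitting the length of each target-keyed group (idiomatic).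


-- ===== PORT A =====
-- loop body: the for-loop's state is (durations, current_duration)
def pvStepA (target_state : String) (p : List Int × Int) (state : String) : List Int × Int :=
  if state = target_state then (p.1, p.2 + 1)
  else if p.2 > 0 then (p.1 ++ [p.2], 0) else p

def calculate_state_durations_py (state_history : List String) (target_state : String) : List Int :=
  let r := state_history.foldl (pvStepA target_state) ([], 0)
  if r.2 > 0 then r.1 ++ [r.2] else r.1

-- ===== PORT B =====
-- port of itertools.groupby on a list of states: consecutive runs as (key, run length)
def pvGroupRuns : List String → List (String × Int)
  | [] => []
  | x :: xs =>
    match pvGroupRuns xs with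
    | [] => [(x, 1)]
    | (k, n) :: rest => if x = k then (k, n + 1) :: rest else (x, 1) :: (k, n) :: rest

def calculate_state_durations_py_alt (state_history : List String) (target_state : String) : List Int :=
  (pvGroupRuns state_history).filterMap
    (fun p => if p.1 = target_state then some p.2 else none)

-- ===== PRECONDITION & SPEC =====
def Spec_calculate_state_durations_py (state_history : List String) (target_state : String) (out : List Int) : Prop := out = calculate_state_durations_py_alt state_history target_state
instance (state_history : List String) (target_state : String) (out : List Int) : Decidable (Spec_calculate_state_durations_py state_history target_state out) := by unfold Spec_calculate_state_durations_py; infer_instance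

-- ===== CLAIM (what is proved, stated in full; the proofs are below) =====
def Claim_equal_calculate_state_durations_py : Prop := ∀ (state_history : List String) (target_state : String), Dom_calculate_state_durations_py state_history target_state → Spec_calculate_state_durations_py state_history target_state (calculate_state_durations_py state_history target_state)

-- ===== LEMMAS AND PROOFS =====

-- A's loop, written as a structural recursion on (current counter, remaining history)
def pvARec (t : String) : Int → List String → List Int
  | c, [] => if c > 0 then [c] else []
  | c, x :: xs => if x = t then pvARec t (c + 1) xs
                  else if c > 0 then c :: pvARec t 0 xs else pvARec t 0 xs

def pvG (t : String) (l : List (String × Int)) : List Int :=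
  l.filterMap (fun p => if p.1 = t then some p.2 else none)

theorem pvFoldl_eq_aRec (t : String) (xs : List String) :
    ∀ (ds : List Int) (c : Int), 0 ≤ c →
      (let r := xs.foldl (pvStepA t) (ds, c);
       if r.2 > 0 then r.1 ++ [r.2] else r.1) = ds ++ pvARec t c xs := by
  induction xs with
  | nil =>
    intro ds c hc
    simp only [List.foldl, pvARec]
    split <;> simp_all
  | cons x xs ih =>
    intro ds c hc
    simp only [List.foldl, pvStepA, pvARec]
    by_cases hx : x = t
    · simp only [hx]
      exact ih ds (c + 1) (by omega)
    · simp only [if_neg hx]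
      by_cases hcpos : c > 0
      · simp only [if_pos hcpos]
        rw [ih (ds ++ [c]) 0 (by omega)]
        simp
      · have hc0 : c = 0 := by omega
        simp only [hc0]
        exact ih ds 0 (by omega)

theorem pvARec_eq_groups (t : String) (xs : List String) :
    (pvARec t 0 xs = pvG t (pvGroupRuns xs)) ∧
    (∀ c : Int, 0 < c →
      pvARec t c xs =
        (match pvGroupRuns xs with
         | [] => [c]
         | (k, n) :: rest =>
             if k = t then (c + n) :: pvG t rest else c :: pvG t ((k, n) :: rest))) := by
  induction xs with
  | nil =>
    constructor
    · simp [pvARec, pvG, pvGroupRuns]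
    · intro c hc; simp [pvARec, pvGroupRuns, hc]
  | cons x xs ih =>
    obtain ⟨ih0, ihp⟩ := ih
    have key : ∀ c : Int, 0 < c →
        pvARec t c (x :: xs) =
          (match pvGroupRuns (x :: xs) with
           | [] => [c]
           | (k, n) :: rest =>
               if k = t then (c + n) :: pvG t rest else c :: pvG t ((k, n) :: rest)) := by
      intro c hc
      by_cases hx : x = t
      · subst hx
        simp only [pvARec, pvGroupRuns]
        rw [ihp (c + 1) (by omega)]
        cases hgr : pvGroupRuns xs with
        | nil => simp [pvG]
        | cons p rest =>
          obtain ⟨k, n⟩ := p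
          by_cases hk : k = x
          · subst hk
            simp [pvG]
            try omega
          · have hk' : ¬ x = k := fun h => hk (Eq.symm h)
            simp [pvG, hk, hk']
            try omega
      · simp only [pvARec, pvGroupRuns, if_neg hx, if_pos hc]
        rw [ih0]
        cases hgr : pvGroupRuns xs with
        | nil => simp [pvG, hx]
        | cons p rest =>
          obtain ⟨k, n⟩ := p
          by_cases hk : x = k
          · subst hk
            simp [pvG, hx]
          · simp [pvG, hx, hk]
    refine ⟨?_, key⟩
    by_cases hx : x = t
    · subst hx
      simp only [pvARec, pvGroupRuns]
      have h01 : (0 : Int) + 1 = 1 := by omega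
      rw [h01, ihp 1 (by omega)]
      cases hgr : pvGroupRuns xs with
      | nil => simp [pvG]
      | cons p rest =>
        obtain ⟨k, n⟩ := p
        by_cases hk : k = x
        · subst hk
          simp [pvG]
          try omega
        · have hk' : ¬ x = k := fun h => hk (Eq.symm h)
          simp [pvG, hk, hk']
          try omega
    · simp only [pvARec, pvGroupRuns, if_neg hx]
      norm_num
      rw [ih0]
      cases hgr : pvGroupRuns xs with
      | nil => simp [pvG, hx]
      | cons p rest =>
        obtain ⟨k, n⟩ := p
        by_cases hk : x = k
        · subst hk
          simp [pvG, hx]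
        · simp [pvG, hx, hk]

-- ===== VERDICT (by name: the statement is the Claim_ definition above) =====
theorem calculate_state_durations_py_spec : Claim_equal_calculate_state_durations_py := by
  intro h t _
  unfold Spec_calculate_state_durations_py calculate_state_durations_py calculate_state_durations_py_alt
  have := pvFoldl_eq_aRec t h [] 0 (by omega)
  simp only [List.nil_append] at this
  rw [this, (pvARec_eq_groups t h).1]
  rfl
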